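-- pv_equiv track=rewrite | github.com/Anica-blip/aurion-3cmascot | scheduled_posts_runner.py | detect_media_type
-- ===== SOURCE A (Python) =====
-- def detect_media_type(media_url, media_item=None):
--     """Detect media type from URL extension or media_item type field"""
--     # First check if media_item has explicit type field
--     if media_item and isinstance(media_item, dict):
--         media_type = media_item.get('type') or media_item.get('media_type') or media_item.get('mediaType')
--         if media_type:
--             media_type_lower = media_type.lower()
--             if 'video' in media_type_lower:
--                 return 'video'
--             elif 'gif' in media_type_lower or 'animation' in media_type_lower:
--                 return 'animation'
--             elif 'image' in media_type_lower or 'photo' in media_type_lower: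
--                 return 'photo'
--             elif 'document' in media_type_lower or 'file' in media_type_lower:
--                 return 'document'
--
--     # Fall back to URL extension detection
--     if not isinstance(media_url, str):
--         return 'photo'  # Default
--
--     media_url_lower = media_url.lower()
--
--     # Video extensions
--     if any(ext in media_url_lower for ext in ['.mp4', '.mov', '.avi', '.mkv', '.webm', '.flv']):
--         return 'video'
--
--     # Animation/GIF extensions
--     if '.gif' in media_url_lower:
--         return 'animation'
--
--     # Document extensions
--     if any(ext in media_url_lower for ext in ['.pdf', '.doc', '.docx', '.txt', '.zip', '.rar', '.csv', '.xls', '.xlsx']):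
--         return 'document'
--
--     # Image extensions (default)
--     if any(ext in media_url_lower for ext in ['.jpg', '.jpeg', '.png', '.webp', '.bmp', '.svg']):
--         return 'photo'
--
--     # Default to photo if no match
--     return 'photo'
-- ===== SOURCE B (Python) =====
-- # B: one flat keyword table scanned exhaustively; keeps the best (lowest-priority)
-- # match in an accumulator instead of A's ordered early-return if/elif chains.
-- _META_KW = [
--     ('video', 0, 'video'),
--     ('gif', 1, 'animation'), ('animation', 1, 'animation'),
--     ('image', 2, 'photo'), ('photo', 2, 'photo'),
--     ('document', 3, 'document'), ('file', 3, 'document'),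
-- ]
--
-- _URL_KW = [
--     ('.mp4', 0, 'video'), ('.mov', 0, 'video'), ('.avi', 0, 'video'),
--     ('.mkv', 0, 'video'), ('.webm', 0, 'video'), ('.flv', 0, 'video'),
--     ('.gif', 1, 'animation'),
--     ('.pdf', 2, 'document'), ('.doc', 2, 'document'), ('.docx', 2, 'document'),
--     ('.txt', 2, 'document'), ('.zip', 2, 'document'), ('.rar', 2, 'document'),
--     ('.csv', 2, 'document'), ('.xls', 2, 'document'), ('.xlsx', 2, 'document'),
--     ('.jpg', 3, 'photo'), ('.jpeg', 3, 'photo'), ('.png', 3, 'photo'),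
--     ('.webp', 3, 'photo'), ('.bmp', 3, 'photo'), ('.svg', 3, 'photo'),
-- ]
--
--
-- def _best_label(kws, text):
--     """Scan every keyword; keep the match with the smallest priority (first wins ties)."""
--     t = text.lower()
--     best = None
--     for kw, pri, label in kws:
--         if kw in t and (best is None or pri < best[0]):
--             best = (pri, label)
--     return best[1] if best is not None else None
--
--
-- def detect_media_type(media_url, media_item=None):
--     if media_item and isinstance(media_item, dict):
--         mt = (media_item.get('type') or media_item.get('media_type')
--               or media_item.get('mediaType'))
--         if mt:
--             label = _best_label(_META_KW, mt)
--             if label is not None: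
--                 return label
--     if not isinstance(media_url, str):
--         return 'photo'
--     label = _best_label(_URL_KW, media_url)
--     return label if label is not None else 'photo'
-- ===== Notes on version B (the rewrite author's own statement) =====
-- stated objective: alternative
-- what changed: Replaces A's ordered early-return if/elif chains with one flat keyword->(priority,label) table scanned exhaustively while a min-priority accumulator keeps the best match; correctness rests on the table priorities encoding A's branch order.
import Mathlib
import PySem

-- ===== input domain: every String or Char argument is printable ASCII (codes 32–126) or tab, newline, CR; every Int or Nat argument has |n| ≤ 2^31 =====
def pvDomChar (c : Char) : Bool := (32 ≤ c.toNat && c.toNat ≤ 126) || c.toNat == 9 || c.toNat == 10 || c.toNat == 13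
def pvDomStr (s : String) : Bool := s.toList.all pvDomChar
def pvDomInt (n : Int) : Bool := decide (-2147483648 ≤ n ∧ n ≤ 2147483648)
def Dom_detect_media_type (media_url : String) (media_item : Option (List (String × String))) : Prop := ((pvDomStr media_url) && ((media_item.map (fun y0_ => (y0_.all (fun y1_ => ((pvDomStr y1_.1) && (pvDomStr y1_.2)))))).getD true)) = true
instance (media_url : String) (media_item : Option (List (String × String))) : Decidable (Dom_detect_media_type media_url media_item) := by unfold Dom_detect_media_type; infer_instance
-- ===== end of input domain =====

-- B replaces A's ordered if/elif chains with one flat keyword->(priority,label) table scanned exhaustively with a min-priority accumulator (alternative, same cost).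


-- ===== PORT A =====
-- 'x or y' on Optional[str] operands, flattened to String with "" for None (both are falsy)
def pvOrStr (x : Option String) (y : String) : String :=
  match x with
  | some s => if s = "" then y else s
  | none => y

def detect_media_type (media_url : String) (media_item : Option (List (String × String))) : String :=
  let fallback : String :=
    -- isinstance(media_url, str) is always true under the type convention
    let u := PySem.Str.lower media_url
    if [".mp4", ".mov", ".avi", ".mkv", ".webm", ".flv"].any (fun e => PySem.Str.isIn e u) then "video"
    else if PySem.Str.isIn ".gif" u then "animation"
    else if [".pdf", ".doc", ".docx", ".txt", ".zip", ".rar", ".csv", ".xls", ".xlsx"].any (fun e => PySem.Str.isIn e u) then "document"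
    else if [".jpg", ".jpeg", ".png", ".webp", ".bmp", ".svg"].any (fun e => PySem.Str.isIn e u) then "photo"
    else "photo"
  match media_item with
  | none => fallback
  | some d =>
    if d ≠ [] then
      let media_type := pvOrStr (PySem.Dict.get? (PySem.Dict.mk d) "type")
        (pvOrStr (PySem.Dict.get? (PySem.Dict.mk d) "media_type") (pvOrStr (PySem.Dict.get? (PySem.Dict.mk d) "mediaType") ""))
      if media_type ≠ "" then
        let l := PySem.Str.lower media_type
        if PySem.Str.isIn "video" l then "video"
        else if PySem.Str.isIn "gif" l || PySem.Str.isIn "animation" l then "animation"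
        else if PySem.Str.isIn "image" l || PySem.Str.isIn "photo" l then "photo"
        else if PySem.Str.isIn "document" l || PySem.Str.isIn "file" l then "document"
        else fallback
      else fallback
    else fallback

-- ===== PORT B =====
def pvMetaKw : List (String × Int × String) :=
  [("video", 0, "video"),
   ("gif", 1, "animation"), ("animation", 1, "animation"),
   ("image", 2, "photo"), ("photo", 2, "photo"),
   ("document", 3, "document"), ("file", 3, "document")]

def pvUrlKw : List (String × Int × String) :=
  [(".mp4", 0, "video"), (".mov", 0, "video"), (".avi", 0, "video"),
   (".mkv", 0, "video"), (".webm", 0, "video"), (".flv", 0, "video"),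
   (".gif", 1, "animation"),
   (".pdf", 2, "document"), (".doc", 2, "document"), (".docx", 2, "document"),
   (".txt", 2, "document"), (".zip", 2, "document"), (".rar", 2, "document"),
   (".csv", 2, "document"), (".xls", 2, "document"), (".xlsx", 2, "document"),
   (".jpg", 3, "photo"), (".jpeg", 3, "photo"), (".png", 3, "photo"),
   (".webp", 3, "photo"), (".bmp", 3, "photo"), (".svg", 3, "photo")]

-- one step of the loop body of _best_label
def pvBestStep (t : String) (best : Option (Int × String)) (kv : String × Int × String) : Option (Int × String) :=
  if PySem.Str.isIn kv.1 t && (match best with | none => true | some b => decide (kv.2.1 < b.1)) then some kv.2 else best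

def pvBestLabel (kws : List (String × Int × String)) (text : String) : Option String :=
  (kws.foldl (pvBestStep (PySem.Str.lower text)) none).map (·.2)

def detect_media_type_alt (media_url : String) (media_item : Option (List (String × String))) : String :=
  let metaRes : Option String :=
    match media_item with
    | none => none
    | some d =>
      if d ≠ [] then
        let mt := pvOrStr (PySem.Dict.get? (PySem.Dict.mk d) "type")
          (pvOrStr (PySem.Dict.get? (PySem.Dict.mk d) "media_type") (pvOrStr (PySem.Dict.get? (PySem.Dict.mk d) "mediaType") ""))
        if mt ≠ "" then pvBestLabel pvMetaKw mt else none
      else none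
  match metaRes with
  | some label => label
  | none =>
    match pvBestLabel pvUrlKw media_url with
    | some label => label
    | none => "photo"

-- ===== PRECONDITION & SPEC =====
def Spec_detect_media_type (media_url : String) (media_item : Option (List (String × String))) (out : String) : Prop := out = detect_media_type_alt media_url media_item
instance (media_url : String) (media_item : Option (List (String × String))) (out : String) : Decidable (Spec_detect_media_type media_url media_item out) := by unfold Spec_detect_media_type; infer_instance

-- ===== CLAIM (what is proved, stated in full; the proofs are below) =====
def Claim_equal_detect_media_type : Prop := ∀ (media_url : String) (media_item : Option (List (String × String))), Dom_detect_media_type media_url media_item → Spec_detect_media_type media_url media_item (detect_media_type media_url media_item)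

-- ===== LEMMAS AND PROOFS =====

-- once the accumulator holds a priority no later keyword beats, it is final
theorem pv_fold_keep (t : String) : ∀ (kws : List (String × Int × String)) (b : Int × String),
    (∀ kv ∈ kws, b.1 ≤ kv.2.1) → kws.foldl (pvBestStep t) (some b) = some b := by
  intro kws
  induction kws with
  | nil => intro b _; rfl
  | cons kv rest ih =>
    intro b h
    have hb : b.1 ≤ kv.2.1 := h kv (List.mem_cons_self ..)
    have : pvBestStep t (some b) kv = some b := by
      simp [pvBestStep, not_lt.mpr hb]
    simp only [List.foldl_cons, this]
    exact ih b (fun x hx => h x (List.mem_cons_of_mem _ hx))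

-- on a table sorted by priority, the min-priority fold is the first match
theorem pv_fold_find (t : String) : ∀ (kws : List (String × Int × String)),
    kws.Pairwise (fun a b => a.2.1 ≤ b.2.1) →
    kws.foldl (pvBestStep t) none = (kws.find? (fun kv => PySem.Str.isIn kv.1 t)).map (fun kv => kv.2) := by
  intro kws
  induction kws with
  | nil => intro _; rfl
  | cons kv rest ih =>
    intro h
    rw [List.pairwise_cons] at h
    by_cases hin : PySem.Chars.isIn kv.1.toList t.toList = true
    · have hstep : pvBestStep t none kv = some kv.2 := by simp [pvBestStep, hin]
      simp only [List.foldl_cons, hstep]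
      rw [pv_fold_keep t rest kv.2 h.1]
      simp [hin]
    · have hstep : pvBestStep t none kv = none := by simp [pvBestStep, hin]
      simp only [List.foldl_cons, hstep]
      rw [ih h.2]
      simp [hin]

-- "first match, mapped, with default": the shape shared by both case lemmas
def pvChain {A B : Type} (g : A → B) (f : B) (o : Option A) : B :=
  match Option.map g o with | some label => label | none => f

theorem pvChain_cons {A B : Type} (g : A → B) (f : B) (p : A → Bool) (a : A) (l : List A) :
    pvChain g f (List.find? p (a :: l)) = if p a then g a else pvChain g f (List.find? p l) := by
  cases h : p a <;> simp [h, pvChain]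

theorem pvChain_eqS (g : String × Int × String → String) (f : String) (o : Option (String × Int × String)) :
    (match Option.map g o with | some label => label | none => f) = pvChain g f o := by
  cases o <;> rfl

theorem pvChain_nil {A B : Type} (g : A → B) (f : B) (p : A → Bool) :
    pvChain g f (List.find? p ([] : List A)) = f := rfl

-- merge two adjacent if-branches with the same result
theorem pvIfOr (p q : Prop) [Decidable p] [Decidable q] (x y : String) :
    (if p then x else if q then x else y) = if (p ∨ q) then x else y := by
  split_ifs <;> tauto

theorem pv_url_case (u : String) :
    (if [".mp4", ".mov", ".avi", ".mkv", ".webm", ".flv"].any (fun e => PySem.Str.isIn e u) then "video"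
     else if PySem.Str.isIn ".gif" u then "animation"
     else if [".pdf", ".doc", ".docx", ".txt", ".zip", ".rar", ".csv", ".xls", ".xlsx"].any (fun e => PySem.Str.isIn e u) then "document"
     else if [".jpg", ".jpeg", ".png", ".webp", ".bmp", ".svg"].any (fun e => PySem.Str.isIn e u) then "photo"
     else "photo")
    = (match (pvUrlKw.foldl (pvBestStep u) none).map (·.2) with
       | some label => label
       | none => "photo") := by
  rw [pv_fold_find u pvUrlKw (by decide), Option.map_map]
  rw [pvChain_eqS]
  simp only [pvUrlKw, pvChain_cons, pvChain_nil]
  simp [pvIfOr]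

theorem pv_meta_case (l f : String) :
    (if PySem.Str.isIn "video" l then "video"
     else if PySem.Str.isIn "gif" l || PySem.Str.isIn "animation" l then "animation"
     else if PySem.Str.isIn "image" l || PySem.Str.isIn "photo" l then "photo"
     else if PySem.Str.isIn "document" l || PySem.Str.isIn "file" l then "document"
     else f)
    = (match (pvMetaKw.foldl (pvBestStep l) none).map (·.2) with
       | some label => label
       | none => f) := by
  rw [pv_fold_find l pvMetaKw (by decide), Option.map_map]
  rw [pvChain_eqS]
  simp only [pvMetaKw, pvChain_cons, pvChain_nil]
  simp [pvIfOr]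

-- ===== VERDICT (by name: the statement is the Claim_ definition above) =====
theorem detect_media_type_spec : Claim_equal_detect_media_type := by
  intro media_url media_item _
  unfold Spec_detect_media_type detect_media_type detect_media_type_alt pvBestLabel
  cases media_item with
  | none => simpa using pv_url_case (PySem.Str.lower media_url)
  | some d =>
    by_cases hd : d = []
    · subst hd
      simpa using pv_url_case (PySem.Str.lower media_url)
    · simp only [hd, ne_eq, not_false_eq_true, if_true]
      by_cases h0 : pvOrStr (PySem.Dict.get? (PySem.Dict.mk d) "type")
          (pvOrStr (PySem.Dict.get? (PySem.Dict.mk d) "media_type")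
            (pvOrStr (PySem.Dict.get? (PySem.Dict.mk d) "mediaType") "")) = ""
      · simp only [h0, not_true_eq_false, if_false]
        simpa using pv_url_case (PySem.Str.lower media_url)
      · simp only [h0, not_false_eq_true, if_true]
        rw [pv_meta_case]
        cases hscan : (pvMetaKw.foldl (pvBestStep (PySem.Str.lower (pvOrStr (PySem.Dict.get? (PySem.Dict.mk d) "type")
            (pvOrStr (PySem.Dict.get? (PySem.Dict.mk d) "media_type")
              (pvOrStr (PySem.Dict.get? (PySem.Dict.mk d) "mediaType") ""))))) none).map (·.2) with
        | some lab => rfl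
        | none => simpa using pv_url_case (PySem.Str.lower media_url)
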